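-- pv_equiv track=rewrite | github.com/ShulaevIvan/py_alg_training | main.py | shortwords
-- ===== SOURCE A (Python) =====
-- def shortwords(words):
--
--     minlen = len(words[0])
--
--     for word in words:
--         if len(word) < minlen:
--             minlen = len(word)
--
--     ans = []
--
--     for word in words:
--
--         if len(word)== minlen:
--             ans.append(word)
--
--     return ' '.join(ans)
-- ===== SOURCE B (Python) =====
-- def shortwords(words):
--     groups = {}
--     for word in words:
--         groups.setdefault(len(word), []).append(word)
--     return ' '.join(groups[min(groups)])
-- ===== Notes on version B (the rewrite author's own statement) =====
-- stated objective: alternative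
-- what changed: B replaces A's two separate scans (find the minimum length, then filter) by one grouping pass into a length-keyed dict followed by a min-key lookup.
import Mathlib
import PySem

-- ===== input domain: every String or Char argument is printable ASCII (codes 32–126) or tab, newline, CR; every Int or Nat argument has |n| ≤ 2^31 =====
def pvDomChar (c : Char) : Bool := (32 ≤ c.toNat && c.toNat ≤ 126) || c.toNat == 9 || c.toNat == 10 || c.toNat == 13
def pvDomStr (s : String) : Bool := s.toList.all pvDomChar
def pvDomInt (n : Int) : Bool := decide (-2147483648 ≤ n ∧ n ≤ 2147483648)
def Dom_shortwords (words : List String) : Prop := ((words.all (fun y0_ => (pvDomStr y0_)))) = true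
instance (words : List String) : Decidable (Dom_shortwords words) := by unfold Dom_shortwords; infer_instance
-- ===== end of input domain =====

-- B replaces A's two scans (find min length, then filter) by one grouping pass into a
-- length-keyed dict followed by a min-key lookup; same cost, different structure.

-- ===== PORT A =====
def shortwords (words : List String) : String :=
  match words with
  | [] => ""  -- Python raises IndexError at words[0]; excluded by Pre_
  | w0 :: _ =>
    let minlen := words.foldl (fun m w => if PySem.Str.len w < m then PySem.Str.len w else m)
      (PySem.Str.len w0)
    let ans := words.foldl (fun acc w => if PySem.Str.len w == minlen then acc ++ [w] else acc)
      ([] : List String)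
    PySem.Str.join " " ans

-- ===== PORT B =====
def shortwords_alt (words : List String) : String :=
  let groups : PySem.Dict Int (List String) :=
    words.foldl (fun d w => d.modify (PySem.Str.len w) [] (· ++ [w])) PySem.Dict.empty
  match PySem.List.min? (PySem.Dict.keys groups) (fun k => k) with
  | none => ""  -- Python raises ValueError at min({}); excluded by Pre_
  | some k => PySem.Str.join " " (groups.getD k [])  -- groups[k]; k = min(groups) is a key, so exact

-- ===== PRECONDITION & SPEC =====
-- Pre_ excludes only the empty list, on which A raises IndexError (and B raises ValueError).
def Pre_shortwords (words : List String) : Prop := words ≠ []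
instance (words : List String) : Decidable (Pre_shortwords words) := by unfold Pre_shortwords; infer_instance
def pvWitness_shortwords : List String := (["ab", "c", "de"])

def Spec_shortwords (words : List String) (out : String) : Prop := out = shortwords_alt words
instance (words : List String) (out : String) : Decidable (Spec_shortwords words out) := by unfold Spec_shortwords; infer_instance

-- ===== CLAIM (what is proved, stated in full; the proofs are below) =====
def Claim_equal_shortwords : Prop := ∀ (words : List String), Dom_shortwords words → Pre_shortwords words → Spec_shortwords words (shortwords words)

-- ===== LEMMAS AND PROOFS =====

-- A's running-minimum loop is foldl min over the lengths
theorem pv_fold_min (l : List String) (a : Int) :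
    l.foldl (fun m w => if PySem.Str.len w < m then PySem.Str.len w else m) a
      = (l.map PySem.Str.len).foldl min a := by
  induction l generalizing a with
  | nil => rfl
  | cons w t ih =>
    simp only [List.foldl, List.map]
    rw [ih]
    congr 1
    simp [min_def]
    omega

-- foldl min is ≤ its start and every element, and is attained
theorem pv_foldl_min_le_start (l : List Int) (a : Int) : l.foldl min a ≤ a := by
  induction l generalizing a with
  | nil => simp
  | cons x t ih => exact le_trans (ih (min a x)) (min_le_left a x)

theorem pv_foldl_min_le (l : List Int) (a : Int) : ∀ y ∈ l, l.foldl min a ≤ y := by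
  induction l generalizing a with
  | nil => simp
  | cons x t ih =>
    intro y hy
    rcases List.mem_cons.mp hy with h | h
    · rw [h]; exact le_trans (pv_foldl_min_le_start t (min a x)) (min_le_right a x)
    · exact ih (min a x) y h

theorem pv_foldl_min_mem (l : List Int) (a : Int) : l.foldl min a = a ∨ l.foldl min a ∈ l := by
  induction l generalizing a with
  | nil => left; rfl
  | cons x t ih =>
    rcases ih (min a x) with h | h
    · rcases min_cases a x with ⟨he, _⟩ | ⟨he, _⟩
      · left; simpa [he] using h
      · right; simp only [List.foldl]; rw [h, he]; exact List.mem_cons_self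
    · right; exact List.mem_cons_of_mem x h

-- the grouping dict's keys are exactly the lengths occurring in words
theorem pv_keys_groups (words : List String) (k : Int) :
    k ∈ (words.foldl (fun d w => d.modify (PySem.Str.len w) [] (· ++ [w]))
          (PySem.Dict.empty : PySem.Dict Int (List String))).keys
      ↔ k ∈ words.map PySem.Str.len := by
  rw [PySem.Dict.keys_foldl_modify_key]
  simp [PySem.Set.mem_update, PySem.Dict.keys_empty]

-- the grouping dict's entry at c is the sublist of words of length c
theorem pv_getD_groups (words : List String) (c : Int) :
    (words.foldl (fun d w => d.modify (PySem.Str.len w) [] (· ++ [w]))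
          (PySem.Dict.empty : PySem.Dict Int (List String))).getD c []
      = words.filter (fun w => PySem.Str.len w == c) := by
  have h : words.foldl (fun d w => d.modify (PySem.Str.len w) [] (· ++ [w]))
        (PySem.Dict.empty : PySem.Dict Int (List String))
      = (words.map (fun w => (PySem.Str.len w, w))).foldl
          (fun d p => d.modify p.1 [] (· ++ [p.2])) PySem.Dict.empty := by
    rw [List.foldl_map]
  rw [h, PySem.Dict.getD_foldl_modify_append]
  simp [List.filter_map, Function.comp_def, List.map_map]

-- main agreement lemma
theorem pv_main (words : List String) (h : words ≠ []) :
    shortwords words = shortwords_alt words := by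
  obtain ⟨w0, t, rfl⟩ := List.exists_cons_of_ne_nil h
  unfold shortwords shortwords_alt
  simp only []
  set groups := (w0 :: t).foldl (fun d w => d.modify (PySem.Str.len w) [] (· ++ [w]))
      (PySem.Dict.empty : PySem.Dict Int (List String)) with hgroups
  -- A's minlen
  set minlen := (w0 :: t).foldl (fun m w => if PySem.Str.len w < m then PySem.Str.len w else m)
      (PySem.Str.len w0) with hminlen
  have hml : minlen = ((w0 :: t).map PySem.Str.len).foldl min (PySem.Str.len w0) := by
    rw [hminlen, pv_fold_min]
  -- minlen is attained and minimal among the lengths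
  have hmem : minlen ∈ (w0 :: t).map PySem.Str.len := by
    rcases pv_foldl_min_mem ((w0 :: t).map PySem.Str.len) (PySem.Str.len w0) with he | he
    · rw [hml, he]; simp
    · rw [hml]; exact he
  have hmin : ∀ y ∈ (w0 :: t).map PySem.Str.len, minlen ≤ y := by
    intro y hy; rw [hml]; exact pv_foldl_min_le _ _ y hy
  -- B's min over the dict keys equals minlen
  have hkeysne : (PySem.Dict.keys groups) ≠ [] := by
    intro hnil
    have := (pv_keys_groups (w0 :: t) minlen).mpr hmem
    rw [← hgroups] at this
    simp [hnil] at this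
  have hne' : PySem.List.min? (PySem.Dict.keys groups) (fun k => k) ≠ none :=
    fun hn => hkeysne ((PySem.List.min?_eq_none_iff _ _).mp hn)
  obtain ⟨b, hb⟩ := Option.ne_none_iff_exists'.mp hne'
  have hbmem : b ∈ (w0 :: t).map PySem.Str.len := by
    have := PySem.List.min?_mem hb
    exact (pv_keys_groups (w0 :: t) b).mp (by rw [← hgroups]; exact this)
  have hble : b ≤ minlen := by
    have := PySem.List.min?_isMin hb minlen
      ((pv_keys_groups (w0 :: t) minlen).mpr hmem)
    simpa using this
  have hleb : minlen ≤ b := hmin b hbmem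
  have hbeq : b = minlen := le_antisymm hble hleb
  rw [hb, hbeq]
  -- both sides join the same filtered list
  have hgetD : groups.getD minlen [] = (w0 :: t).filter (fun w => PySem.Str.len w == minlen) := by
    rw [hgroups]; exact pv_getD_groups (w0 :: t) minlen
  rw [PySem.List.foldl_append_if_eq_filter]
  simp [hgetD]

-- ===== VERDICT (by name: the statement is the Claim_ definition above) =====
theorem shortwords_spec : Claim_equal_shortwords := by
  intro words _ hpre
  unfold Spec_shortwords
  exact pv_main words hpre
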